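-- pv_equiv track=rewrite | github.com/arvestad/genomstromning | genomstromning/main.py | compute_student_scores_per_course
-- ===== SOURCE A (Python) =====
-- def get_course_codes(students, results):
--     '''
--     Return a list of course codes, sorted by the order of total hp generated.
--     This should place MM2001 first, but it is discovered in the data.
--     '''
--     codes = dict()
--     for pnr, res in results.items():
--         for code in res:
--             if code not in codes:
--                 codes[code] = 0
--             for module, hp in res[code].items():
--                 if pnr in students:
--                     codes[code] += hp
--     return list(sorted(codes.keys(), key=lambda code: codes[code], reverse=True))
--
-- def compute_student_scores_per_course(students, results):
--     student_scores = {}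
--     codes = get_course_codes(students, results)
--
--     scores = dict()             # Map course code to student points
--     for code in codes:
--         scores[code] = dict()
--         for pnr in students:
--             sc = 0
--             if pnr in results and code in results[pnr]:
--                 for module in results[pnr][code]:
--                     sc += results[pnr][code][module]
--             scores[code][pnr] = sc
--     return scores
-- ===== SOURCE B (Python) =====
-- def compute_student_scores_per_course(students, results):
--     student_set = set(students)
--     # one pass: per-course totals (over enrolled students) in first-appearance order
--     totals = {}
--     for pnr, res in results.items():
--         enrolled = pnr in student_set
--         for code, modules in res.items():
--             totals[code] = totals.get(code, 0) + (sum(modules.values()) if enrolled else 0)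
--     codes = sorted(totals, key=lambda c: totals[c], reverse=True)
--     # dense zero-initialized table, then scatter-accumulate in one pass over results
--     scores = {code: {pnr: 0 for pnr in students} for code in codes}
--     for pnr, res in results.items():
--         if pnr in student_set:
--             for code, modules in res.items():
--                 scores[code][pnr] += sum(modules.values())
--     return scores
-- ===== Notes on version B (the rewrite author's own statement) =====
-- stated objective: alternative
-- what changed: A fills each table cell by a per-(course,student) gather that re-looks the student up in results and re-sums the module dict (and get_course_codes re-checks 'pnr in students' per module); B builds the per-course totals and the zero-initialized dense table first, then fills it in a single scatter pass over results.items(), adding each module sum into its cell.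
import Mathlib
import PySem

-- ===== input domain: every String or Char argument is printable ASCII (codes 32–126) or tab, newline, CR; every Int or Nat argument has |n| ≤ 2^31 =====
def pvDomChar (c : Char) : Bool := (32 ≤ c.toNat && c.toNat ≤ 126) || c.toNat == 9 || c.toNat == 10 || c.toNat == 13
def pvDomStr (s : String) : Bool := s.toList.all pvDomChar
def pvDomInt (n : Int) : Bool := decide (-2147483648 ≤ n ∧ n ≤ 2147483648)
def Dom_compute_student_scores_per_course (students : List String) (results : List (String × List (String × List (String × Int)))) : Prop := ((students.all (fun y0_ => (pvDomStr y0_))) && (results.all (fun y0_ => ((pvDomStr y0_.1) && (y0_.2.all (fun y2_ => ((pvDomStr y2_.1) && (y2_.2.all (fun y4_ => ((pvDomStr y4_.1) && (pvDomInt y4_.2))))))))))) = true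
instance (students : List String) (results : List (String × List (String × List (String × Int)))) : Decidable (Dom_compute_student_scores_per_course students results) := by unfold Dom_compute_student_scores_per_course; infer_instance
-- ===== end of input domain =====

-- B replaces A's per-cell gather (for every code and student, look the student up in `results` and re-sum the
-- module dict) by a zero-initialized dense table filled in ONE scatter pass over `results`; same return value.

abbrev Dict1 : Type := PySem.Dict String Int
abbrev Dict2 : Type := PySem.Dict String Dict1
abbrev Dict3 : Type := PySem.Dict String Dict2

-- boundary decoding of the dict-typed argument (dict → dict → dict, Python dict semantics), shared by both ports
def pvToDicts (results : List (String × List (String × List (String × Int)))) : Dict3 :=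
  PySem.Dict.ofList (results.map (fun pr =>
    (pr.1, PySem.Dict.ofList (pr.2.map (fun cm => (cm.1, PySem.Dict.ofList cm.2))))))

-- ===== PORT A =====
-- helper as in A: codes dict accumulated per (pnr, res), then sorted by total hp, descending, stable
def get_course_codes (students : List String) (R : Dict3) : List String :=
  let codes : Dict1 :=
    R.items.foldl (fun codes pr =>
      pr.2.keys.foldl (fun codes code =>
        let codes := if codes.contains code then codes else codes.insert code 0
        (pr.2.getD code PySem.Dict.empty).items.foldl
          (fun codes mh => if pr.1 ∈ students then codes.modify code 0 (· + mh.2) else codes)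
          codes)
        codes)
      PySem.Dict.empty
  PySem.List.sorted codes.keys (fun code => codes.getD code 0) true

def compute_student_scores_per_course (students : List String) (results : List (String × List (String × List (String × Int)))) : List (String × List (String × Int)) :=
  let R := pvToDicts results
  let codes := get_course_codes students R
  let scores : Dict2 :=
    codes.foldl (fun scores code =>
      let scores := scores.insert code PySem.Dict.empty
      students.foldl (fun scores pnr =>
        let sc : Int :=
          if R.contains pnr && (R.getD pnr PySem.Dict.empty).contains code then
            ((R.getD pnr PySem.Dict.empty).getD code PySem.Dict.empty).keys.foldl
              (fun sc m => sc + ((R.getD pnr PySem.Dict.empty).getD code PySem.Dict.empty).getD m 0) 0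
          else 0
        scores.insert code ((scores.getD code PySem.Dict.empty).insert pnr sc))
        scores)
      PySem.Dict.empty
  scores.items.map (fun cd => (cd.1, cd.2.items))

-- ===== PORT B =====
def compute_student_scores_per_course_alt (students : List String) (results : List (String × List (String × List (String × Int)))) : List (String × List (String × Int)) :=
  let R := pvToDicts results
  let studentSet : PySem.Set String := PySem.Set.ofList students
  let totals : Dict1 :=
    R.items.foldl (fun totals pr =>
      let enrolled := pr.1 ∈ studentSet
      pr.2.items.foldl (fun totals cm =>
        totals.insert cm.1 (totals.getD cm.1 0 + (if enrolled then cm.2.values.sum else 0)))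
        totals)
      PySem.Dict.empty
  let codes := PySem.List.sorted totals.keys (fun c => totals.getD c 0) true
  let scores0 : Dict2 :=
    codes.foldl (fun sc code =>
      sc.insert code (students.foldl (fun row pnr => row.insert pnr 0) PySem.Dict.empty))
      PySem.Dict.empty
  let scores : Dict2 :=
    R.items.foldl (fun scores pr =>
      if pr.1 ∈ studentSet then
        pr.2.items.foldl (fun scores cm =>
          scores.modify cm.1 PySem.Dict.empty (fun row => row.modify pr.1 0 (· + cm.2.values.sum)))
          scores
      else scores)
      scores0
  scores.items.map (fun cd => (cd.1, cd.2.items))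

-- ===== PRECONDITION & SPEC =====
def Spec_compute_student_scores_per_course (students : List String) (results : List (String × List (String × List (String × Int)))) (out : List (String × List (String × Int))) : Prop := out = compute_student_scores_per_course_alt students results
instance (students : List String) (results : List (String × List (String × List (String × Int)))) (out : List (String × List (String × Int))) : Decidable (Spec_compute_student_scores_per_course students results out) := by unfold Spec_compute_student_scores_per_course; infer_instance

-- ===== CLAIM (what is proved, stated in full; the proofs are below) =====
def Claim_equal_compute_student_scores_per_course : Prop := ∀ (students : List String) (results : List (String × List (String × List (String × Int)))), Dom_compute_student_scores_per_course students results → Spec_compute_student_scores_per_course students results (compute_student_scores_per_course students results)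

-- ===== LEMMAS AND PROOFS =====

theorem pv_foldl_congr_inv {α β : Type} (P : α → Prop) (f g : α → β → α) (l : List β)
    (h : ∀ a, P a → ∀ x ∈ l, f a x = g a x ∧ P (f a x)) :
    ∀ a, P a → l.foldl f a = l.foldl g a := by
  induction l with
  | nil => intro a _; rfl
  | cons x xs ih =>
    intro a ha
    have hx := h a ha x (by simp)
    simp only [List.foldl_cons, hx.1]
    exact ih (fun a ha y hy => h a ha y (by simp [hy])) _ (hx.1 ▸ hx.2)

theorem pv_insert_getD_self {κ ν : Type} [BEq κ] [LawfulBEq κ] (d : PySem.Dict κ ν) (k : κ) (dflt : ν)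
    (h : d.contains k = true) (hn : d.keys.Nodup) : d.insert k (d.getD k dflt) = d := by
  apply PySem.Dict.ext
  rw [PySem.Dict.items_insert_of_contains d _ h]
  conv_rhs => rw [← List.map_id d.items]
  apply List.map_congr_left
  intro p hp
  by_cases hk : p.1 = k
  · have hmem : (p.1, p.2) ∈ d.items := by simpa using hp
    have hv : d.getD k dflt = p.2 := by
      subst hk
      exact PySem.Dict.getD_of_mem_items d hmem hn dflt
    simp only [hk, beq_self_eq_true, if_true, id_eq, hv]
    exact Prod.ext hk.symm rfl
  · simp [hk]

theorem pv_collapse_modify {β : Type} (l : List β) (g : β → Int) (k : String) (d : PySem.Dict String Int)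
    (h : d.contains k = true) (hn : d.keys.Nodup) :
    l.foldl (fun d x => d.modify k 0 (· + g x)) d = d.insert k (d.getD k 0 + (l.map g).sum) := by
  induction l generalizing d with
  | nil => simpa using (pv_insert_getD_self d k 0 h hn).symm
  | cons x xs ih =>
    rw [List.foldl_cons]
    rw [show d.modify k 0 (· + g x) = d.insert k (d.getD k 0 + g x) from rfl]
    rw [ih _ (PySem.Dict.contains_insert_self d k _) (PySem.Dict.nodup_keys_insert d k _ hn)]
    rw [PySem.Dict.insert_insert_self, PySem.Dict.getD_insert_self]
    simp [add_assoc]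

theorem pv_foldl_id {α β : Type} (l : List β) (a : α) : l.foldl (fun a _ => a) a = a := by
  induction l with
  | nil => rfl
  | cons x xs ih => simp only [List.foldl_cons]; exact ih

theorem pv_key_step (c : Prop) [Decidable c] (m : PySem.Dict String Int) (code : String)
    (d : PySem.Dict String Int) (hn : d.keys.Nodup) :
    (m.items.foldl (fun d mh => if c then d.modify code 0 (· + mh.2) else d)
      (if d.contains code then d else d.insert code 0))
    = d.insert code (d.getD code 0 + (if c then m.values.sum else 0)) := by
  by_cases hc : c
  · simp only [hc, if_true]
    by_cases hcon : d.contains code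
    · simp only [hcon, if_true]
      rw [pv_collapse_modify m.items (fun mh => mh.2) code d hcon hn]
      rfl
    · simp only [hcon, Bool.false_eq_true, if_false]
      rw [pv_collapse_modify m.items (fun mh => mh.2) code _ (PySem.Dict.contains_insert_self d code 0)
        (PySem.Dict.nodup_keys_insert d code 0 hn)]
      rw [PySem.Dict.insert_insert_self, PySem.Dict.getD_insert_self,
        PySem.Dict.getD_of_not_contains d 0 (by simpa using hcon)]
      rfl
  · simp only [hc, if_false]
    rw [pv_foldl_id]
    by_cases hcon : d.contains code
    · simp only [hcon, if_true]
      rw [add_zero, pv_insert_getD_self d code 0 hcon hn]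
    · simp only [hcon, Bool.false_eq_true, if_false,
        PySem.Dict.getD_of_not_contains d 0 (by simpa using hcon), add_zero]

theorem pv_totals_eq (students : List String) (L : List (String × PySem.Dict String (PySem.Dict String Int)))
    (hres : ∀ pr ∈ L, pr.2.keys.Nodup) (d : PySem.Dict String Int) (hd : d.keys.Nodup) :
    L.foldl (fun codes pr =>
      pr.2.keys.foldl (fun codes code =>
        (pr.2.getD code PySem.Dict.empty).items.foldl
          (fun codes mh => if pr.1 ∈ students then codes.modify code 0 (· + mh.2) else codes)
          (if codes.contains code then codes else codes.insert code 0))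
        codes) d
    = L.foldl (fun totals pr =>
        pr.2.items.foldl (fun totals cm =>
          totals.insert cm.1 (totals.getD cm.1 0 + (if pr.1 ∈ PySem.Set.ofList students then cm.2.values.sum else 0)))
          totals) d := by
  apply pv_foldl_congr_inv (fun d => d.keys.Nodup) _ _ L _ d hd
  intro a ha pr hpr
  have hstep : ∀ (a : PySem.Dict String Int), a.keys.Nodup →
      pr.2.keys.foldl (fun codes code =>
        (pr.2.getD code PySem.Dict.empty).items.foldl
          (fun codes mh => if pr.1 ∈ students then codes.modify code 0 (· + mh.2) else codes)
          (if codes.contains code then codes else codes.insert code 0)) a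
      = pr.2.items.foldl (fun totals cm =>
          totals.insert cm.1 (totals.getD cm.1 0 + (if pr.1 ∈ PySem.Set.ofList students then cm.2.values.sum else 0))) a := by
    intro a ha
    rw [PySem.Dict.items_eq_map_keys pr.2 (hres pr hpr) PySem.Dict.empty, List.foldl_map]
    apply pv_foldl_congr_inv (fun d => d.keys.Nodup) _ _ pr.2.keys _ a ha
    intro b hb code _
    constructor
    · simp only [PySem.Set.mem_ofList]
      exact pv_key_step (pr.1 ∈ students) (pr.2.getD code PySem.Dict.empty) code b hb
    · simp only []
      rw [pv_key_step (pr.1 ∈ students) (pr.2.getD code PySem.Dict.empty) code b hb]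
      exact PySem.Dict.nodup_keys_insert _ _ _ hb
  constructor
  · exact hstep a ha
  · rw [hstep a ha]
    exact PySem.Dict.nodup_keys_foldl_insert_key pr.2.items (fun cm => cm.1) _ a ha

-- S3: dense insert fold, getD
theorem pv_getD_foldl_insert_fun {ν : Type} (l : List String) (v : String → ν) (d : PySem.Dict String ν)
    (p : String) (d0 : ν) :
    (l.foldl (fun r x => r.insert x (v x)) d).getD p d0 = if p ∈ l then v p else d.getD p d0 := by
  induction l generalizing d with
  | nil => simp
  | cons x xs ih =>
    rw [List.foldl_cons, ih]
    by_cases hx : p ∈ xs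
    · simp [hx, List.mem_cons]
    · rw [PySem.Dict.getD_insert]
      by_cases hpx : p = x <;> simp [hpx, hx, List.mem_cons]

-- S4: getD commutes with the inner scatter step
theorem pv_getD_scatter_inner (ms : List (String × PySem.Dict String Int)) (pnr : String)
    (s : PySem.Dict String (PySem.Dict String Int)) (c : String) :
    (ms.foldl (fun s cm => s.modify cm.1 PySem.Dict.empty (fun row => row.modify pnr 0 (· + cm.2.values.sum))) s).getD c PySem.Dict.empty
    = ms.foldl (fun row cm => if cm.1 = c then row.modify pnr 0 (· + cm.2.values.sum) else row) (s.getD c PySem.Dict.empty) := by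
  induction ms generalizing s with
  | nil => rfl
  | cons cm ms ih =>
    rw [List.foldl_cons, List.foldl_cons, ih, PySem.Dict.getD_modify]
    by_cases hc : cm.1 = c
    · subst hc
      simp
    · rw [if_neg (fun h => hc h.symm), if_neg hc]

-- S4': getD commutes with the outer scatter
theorem pv_getD_scatter_outer (L : List (String × PySem.Dict String (PySem.Dict String Int))) (SS : List String)
    (s : PySem.Dict String (PySem.Dict String Int)) (c : String) :
    (L.foldl (fun scores pr =>
        if pr.1 ∈ SS then
          pr.2.items.foldl (fun scores cm =>
            scores.modify cm.1 PySem.Dict.empty (fun row => row.modify pr.1 0 (· + cm.2.values.sum))) scores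
        else scores) s).getD c PySem.Dict.empty
    = L.foldl (fun row pr =>
        if pr.1 ∈ SS then
          pr.2.items.foldl (fun row cm => if cm.1 = c then row.modify pr.1 0 (· + cm.2.values.sum) else row) row
        else row) (s.getD c PySem.Dict.empty) := by
  induction L generalizing s with
  | nil => rfl
  | cons pr L ih =>
    rw [List.foldl_cons, List.foldl_cons, ih]
    by_cases hm : pr.1 ∈ SS
    · simp only [hm, if_true, pv_getD_scatter_inner]
    · simp [hm]

-- S5 row-level: keys preserved by the row fold when the touched key is present
theorem pv_keys_rowfold (ms : List (String × PySem.Dict String Int)) (pnr : String) (c : String)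
    (row : PySem.Dict String Int) (hp : pnr ∈ row.keys) :
    (ms.foldl (fun row cm => if cm.1 = c then row.modify pnr 0 (· + cm.2.values.sum) else row) row).keys = row.keys := by
  induction ms generalizing row with
  | nil => rfl
  | cons cm ms ih =>
    rw [List.foldl_cons]
    by_cases hc : cm.1 = c
    · simp only [hc, if_true]
      have hk : (row.modify pnr 0 (· + cm.2.values.sum)).keys = row.keys := by
        rw [PySem.Dict.keys_modify]
        exact PySem.Dict.keys_insert_of_contains row _ ((PySem.Dict.contains_iff_mem_keys row pnr).mpr hp)
      rw [ih _ (hk ▸ hp), hk]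
    · simp only [hc, if_false]
      exact ih row hp

theorem pv_keys_rowscatter (L : List (String × PySem.Dict String (PySem.Dict String Int))) (SS : List String)
    (c : String) (row : PySem.Dict String Int) (hSS : ∀ p ∈ SS, p ∈ row.keys) :
    (L.foldl (fun row pr =>
        if pr.1 ∈ SS then
          pr.2.items.foldl (fun row cm => if cm.1 = c then row.modify pr.1 0 (· + cm.2.values.sum) else row) row
        else row) row).keys = row.keys := by
  induction L generalizing row with
  | nil => rfl
  | cons pr L ih =>
    rw [List.foldl_cons]
    by_cases hm : pr.1 ∈ SS
    · simp only [hm, if_true]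
      have hk := pv_keys_rowfold pr.2.items pr.1 c row (hSS pr.1 hm)
      rw [ih _ (fun p hp => hk ▸ hSS p hp), hk]
    · simp only [hm, if_false]
      exact ih row hSS

-- S6 inner: value of the row fold
theorem pv_getD_rowfold (ms : List (String × PySem.Dict String Int)) (pnr c : String)
    (row : PySem.Dict String Int) (q : String) :
    (ms.foldl (fun row cm => if cm.1 = c then row.modify pnr 0 (· + cm.2.values.sum) else row) row).getD q 0
    = row.getD q 0 + (if q = pnr then ((ms.filter (fun cm => cm.1 == c)).map (fun cm => cm.2.values.sum)).sum else 0) := by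
  induction ms generalizing row with
  | nil => simp
  | cons cm ms ih =>
    rw [List.foldl_cons, ih]
    by_cases hc : cm.1 = c
    · rw [if_pos hc, PySem.Dict.getD_modify, List.filter_cons_of_pos (by simpa using hc)]
      by_cases hq : q = pnr
      · subst hq
        simp only [if_true, List.map_cons, List.sum_cons]
        ring
      · rw [if_neg hq, if_neg hq, if_neg hq]
    · rw [if_neg hc, List.filter_cons_of_neg (by simpa using hc)]

-- S6 outer: value of the whole scatter, per row cell
theorem pv_getD_rowscatter (L : List (String × PySem.Dict String (PySem.Dict String Int))) (SS : List String)
    (c : String) (row : PySem.Dict String Int) (q : String) :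
    (L.foldl (fun row pr =>
        if pr.1 ∈ SS then
          pr.2.items.foldl (fun row cm => if cm.1 = c then row.modify pr.1 0 (· + cm.2.values.sum) else row) row
        else row) row).getD q 0
    = row.getD q 0 + (if q ∈ SS then
        ((L.filter (fun pr => pr.1 == q)).map
          (fun pr => ((pr.2.items.filter (fun cm => cm.1 == c)).map (fun cm => cm.2.values.sum)).sum)).sum
      else 0) := by
  induction L generalizing row with
  | nil => simp
  | cons pr L ih =>
    rw [List.foldl_cons, ih]
    by_cases hm : pr.1 ∈ SS
    · rw [if_pos hm, pv_getD_rowfold]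
      by_cases hq : q = pr.1
      · rw [if_pos hq, List.filter_cons_of_pos (by simpa using hq.symm), if_pos (hq ▸ hm),
          if_pos (hq ▸ hm), List.map_cons, List.sum_cons]
        ring
      · rw [if_neg hq, List.filter_cons_of_neg (by simpa using fun h => hq h.symm), add_zero]
    · rw [if_neg hm]
      by_cases hqs : q ∈ SS
      · rw [if_pos hqs, if_pos hqs,
          List.filter_cons_of_neg (by simp only [beq_iff_eq]; intro h; exact hm (by rwa [h]))]
      · rw [if_neg hqs, if_neg hqs]

-- S7: in a list with nodup first components, filtering on a key gives the unique match
theorem pv_filter_fst_of_mem {ν : Type} (l : List (String × ν)) (hn : (l.map Prod.fst).Nodup)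
    (p : String) (v : ν) (hmem : (p, v) ∈ l) : l.filter (fun q => q.1 == p) = [(p, v)] := by
  induction l with
  | nil => cases hmem
  | cons x xs ih =>
    simp only [List.map_cons, List.nodup_cons] at hn
    rcases List.mem_cons.mp hmem with h | h
    · subst h
      rw [List.filter_cons_of_pos (by simp)]
      have : xs.filter (fun q => q.1 == p) = [] := by
        apply List.filter_eq_nil_iff.mpr
        intro a ha
        simp only [beq_iff_eq]
        intro hq
        have h1 : a.1 ∈ xs.map Prod.fst := List.mem_map_of_mem (f := Prod.fst) ha
        rw [hq] at h1
        exact hn.1 h1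
      rw [this]
    · have hx : x.1 ≠ p := by
        intro hq
        have h1 : (p, v).1 ∈ xs.map Prod.fst := List.mem_map_of_mem (f := Prod.fst) h
        rw [← hq] at h1
        exact hn.1 h1
      rw [List.filter_cons_of_neg (by simpa using hx)]
      exact ih hn.2 h

theorem pv_filter_fst_of_not_mem {ν : Type} (l : List (String × ν)) (p : String)
    (h : p ∉ l.map Prod.fst) : l.filter (fun q => q.1 == p) = [] := by
  apply List.filter_eq_nil_iff.mpr
  intro a ha
  simp only [beq_iff_eq]
  intro hq
  have h1 : a.1 ∈ l.map Prod.fst := List.mem_map_of_mem (f := Prod.fst) ha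
  rw [hq] at h1
  exact h h1

-- A's inner student loop only rewrites the row at `code`
theorem pv_A_inner_scores (students : List String) (v : String → Int) (code : String)
    (scores : PySem.Dict String (PySem.Dict String Int)) (row : PySem.Dict String Int) :
    students.foldl (fun s pnr => s.insert code ((s.getD code PySem.Dict.empty).insert pnr (v pnr)))
      (scores.insert code row)
    = scores.insert code (students.foldl (fun r pnr => r.insert pnr (v pnr)) row) := by
  induction students generalizing row with
  | nil => rfl
  | cons p ps ih =>
    rw [List.foldl_cons, PySem.Dict.getD_insert_self, PySem.Dict.insert_insert_self, ih,
      List.foldl_cons]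

-- A's gather over keys equals the values sum
theorem pv_gather_eq_values_sum (m : PySem.Dict String Int) (hn : m.keys.Nodup) :
    m.keys.foldl (fun sc k => sc + m.getD k 0) 0 = m.values.sum := by
  rw [PySem.List.foldl_add m.keys (fun k => m.getD k 0) 0,
    PySem.Dict.values_eq_map_keys m hn 0]
  simp

-- items of a foldl of inserts from `ofList` structure
theorem pv_mem_items_foldl_insert {κ ν : Type} [BEq κ] [LawfulBEq κ]
    (l : List (κ × ν)) (d : PySem.Dict κ ν) (q : κ × ν) :
    q ∈ (l.foldl (fun d p => d.insert p.1 p.2) d).items → q ∈ d.items ∨ q ∈ l := by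
  induction l generalizing d with
  | nil => exact fun h => Or.inl h
  | cons p ps ih =>
    intro h
    rcases ih _ h with h' | h'
    · rcases (PySem.Dict.mem_items_insert d p.1 p.2 q).mp h' with h'' | h''
      · exact Or.inr (by simp [h''])
      · exact Or.inl h''.1
    · exact Or.inr (by simp [h'])

theorem pv_mem_items_ofList {κ ν : Type} [BEq κ] [LawfulBEq κ] (l : List (κ × ν)) (q : κ × ν)
    (h : q ∈ (PySem.Dict.ofList l).items) : q ∈ l := by
  rcases pv_mem_items_foldl_insert l PySem.Dict.empty q h with h' | h'
  · cases h'
  · exact h'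

-- key membership in the B totals dict
theorem pv_mem_keys_totals_inner (ms : List (String × PySem.Dict String Int)) (w : String × PySem.Dict String Int → Int)
    (t : PySem.Dict String Int) (k : String)
    (h : k ∈ t.keys ∨ k ∈ ms.map Prod.fst) :
    k ∈ (ms.foldl (fun t cm => t.insert cm.1 (t.getD cm.1 0 + w cm)) t).keys := by
  rw [PySem.Dict.keys_foldl_insert_key ms Prod.fst (fun t cm => t.getD cm.1 0 + w cm) t]
  exact (PySem.Set.mem_update t.keys (ms.map Prod.fst) k).mpr h

theorem pv_nodup_keys_totals (students : List String) (L : List (String × PySem.Dict String (PySem.Dict String Int)))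
    (d : PySem.Dict String Int) (hd : d.keys.Nodup) :
    (L.foldl (fun totals pr =>
        pr.2.items.foldl (fun totals cm =>
          totals.insert cm.1 (totals.getD cm.1 0 + (if pr.1 ∈ PySem.Set.ofList students then cm.2.values.sum else 0)))
          totals) d).keys.Nodup := by
  induction L generalizing d with
  | nil => exact hd
  | cons pr L ih =>
    rw [List.foldl_cons]
    exact ih _ (PySem.Dict.nodup_keys_foldl_insert_key pr.2.items Prod.fst _ d hd)

theorem pv_mem_keys_totals (students : List String) (L : List (String × PySem.Dict String (PySem.Dict String Int)))
    (d : PySem.Dict String Int) (k : String)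
    (h : k ∈ d.keys ∨ ∃ pr ∈ L, k ∈ pr.2.items.map Prod.fst) :
    k ∈ (L.foldl (fun totals pr =>
        pr.2.items.foldl (fun totals cm =>
          totals.insert cm.1 (totals.getD cm.1 0 + (if pr.1 ∈ PySem.Set.ofList students then cm.2.values.sum else 0)))
          totals) d).keys := by
  induction L generalizing d with
  | nil =>
    rcases h with h | ⟨pr, hpr, _⟩
    · exact h
    · cases hpr
  | cons pr L ih =>
    rw [List.foldl_cons]
    apply ih
    rcases h with h | ⟨pr', hpr', hk⟩
    · exact Or.inl (pv_mem_keys_totals_inner pr.2.items _ d k (Or.inl h))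
    · rcases List.mem_cons.mp hpr' with h' | h'
      · exact Or.inl (pv_mem_keys_totals_inner pr.2.items _ d k (Or.inr (h' ▸ hk)))
      · exact Or.inr ⟨pr', h', hk⟩

-- keys preserved by the dict-level scatter
theorem pv_keys_scatter_inner (ms : List (String × PySem.Dict String Int)) (pnr : String)
    (s : PySem.Dict String (PySem.Dict String Int)) (h : ∀ cm ∈ ms, cm.1 ∈ s.keys) :
    (ms.foldl (fun s cm => s.modify cm.1 PySem.Dict.empty (fun row => row.modify pnr 0 (· + cm.2.values.sum))) s).keys = s.keys := by
  induction ms generalizing s with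
  | nil => rfl
  | cons cm ms ih =>
    rw [List.foldl_cons]
    have hk : (s.modify cm.1 PySem.Dict.empty (fun row => row.modify pnr 0 (· + cm.2.values.sum))).keys = s.keys := by
      rw [PySem.Dict.keys_modify]
      exact PySem.Dict.keys_insert_of_contains s _
        ((PySem.Dict.contains_iff_mem_keys s cm.1).mpr (h cm (by simp)))
    rw [ih _ (fun cm' hcm' => hk ▸ h cm' (by simp [hcm'])), hk]

theorem pv_keys_scatter_outer (L : List (String × PySem.Dict String (PySem.Dict String Int))) (SS : List String)
    (s : PySem.Dict String (PySem.Dict String Int))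
    (h : ∀ pr ∈ L, ∀ cm ∈ pr.2.items, cm.1 ∈ s.keys) :
    (L.foldl (fun scores pr =>
        if pr.1 ∈ SS then
          pr.2.items.foldl (fun scores cm =>
            scores.modify cm.1 PySem.Dict.empty (fun row => row.modify pr.1 0 (· + cm.2.values.sum))) scores
        else scores) s).keys = s.keys := by
  induction L generalizing s with
  | nil => rfl
  | cons pr L ih =>
    rw [List.foldl_cons]
    by_cases hm : pr.1 ∈ SS
    · rw [if_pos hm]
      have hk := pv_keys_scatter_inner pr.2.items pr.1 s (h pr (by simp))
      rw [ih _ (fun pr' hpr' cm hcm => hk ▸ h pr' (by simp [hpr']) cm hcm), hk]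
    · rw [if_neg hm]
      exact ih s (fun pr' hpr' => h pr' (by simp [hpr']))

-- the scattered cell total equals A's gathered per-cell score
theorem pv_cellsum (R : PySem.Dict String (PySem.Dict String (PySem.Dict String Int)))
    (hRnd : R.keys.Nodup) (hres : ∀ pr ∈ R.items, pr.2.keys.Nodup)
    (hmod : ∀ pr ∈ R.items, ∀ cm ∈ pr.2.items, cm.2.keys.Nodup) (p c : String) :
    ((R.items.filter (fun pr => pr.1 == p)).map
        (fun pr => ((pr.2.items.filter (fun cm => cm.1 == c)).map (fun cm => cm.2.values.sum)).sum)).sum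
    = if R.contains p && (R.getD p PySem.Dict.empty).contains c then
        ((R.getD p PySem.Dict.empty).getD c PySem.Dict.empty).keys.foldl
          (fun sc m => sc + ((R.getD p PySem.Dict.empty).getD c PySem.Dict.empty).getD m 0) 0
      else 0 := by
  cases hp : R.get? p with
  | none =>
    have hcon : R.contains p = false := by
      rw [PySem.Dict.contains_eq_isSome_get?, hp]; rfl
    rw [pv_filter_fst_of_not_mem R.items p
      (by rw [show R.items.map Prod.fst = R.keys from rfl]
          exact (PySem.Dict.get?_eq_none_iff_not_mem_keys R p).mp hp)]
    simp [hcon]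
  | some res =>
    have hmem : (p, res) ∈ R.items := (PySem.Dict.get?_eq_some_iff_mem_items R p res hRnd).mp hp
    have hcon : R.contains p = true := by
      rw [PySem.Dict.contains_eq_isSome_get?, hp]; rfl
    have hgd : R.getD p PySem.Dict.empty = res := PySem.Dict.getD_of_get?_eq_some R _ hp
    rw [pv_filter_fst_of_mem R.items hRnd p res hmem, List.map_cons, List.map_nil, List.sum_cons,
      List.sum_nil, add_zero, hcon, hgd]
    have hresnd : res.keys.Nodup := hres _ hmem
    cases hc : res.get? c with
    | none =>
      have hconc : res.contains c = false := by
        rw [PySem.Dict.contains_eq_isSome_get?, hc]; rfl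
      rw [pv_filter_fst_of_not_mem res.items c
        (by rw [show res.items.map Prod.fst = res.keys from rfl]
            exact (PySem.Dict.get?_eq_none_iff_not_mem_keys res c).mp hc)]
      simp [hconc]
    | some m =>
      have hmemc : (c, m) ∈ res.items := (PySem.Dict.get?_eq_some_iff_mem_items res c m hresnd).mp hc
      have hconc : res.contains c = true := by
        rw [PySem.Dict.contains_eq_isSome_get?, hc]; rfl
      have hgdc : res.getD c PySem.Dict.empty = m := PySem.Dict.getD_of_get?_eq_some res _ hc
      rw [pv_filter_fst_of_mem res.items hresnd c m hmemc, hconc, hgdc]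
      simp only [Bool.and_self, if_true, List.map_cons, List.map_nil, List.sum_cons, List.sum_nil,
        add_zero]
      exact (pv_gather_eq_values_sum m (hmod _ hmem _ hmemc)).symm


-- two nodup-keyed dicts with the same key list and the same lookups are equal
theorem pv_dict_eq_of (d e : PySem.Dict String Int) (S : List String)
    (hd : d.keys = S) (he : e.keys = S) (hS : S.Nodup)
    (h : ∀ p ∈ S, d.getD p 0 = e.getD p 0) : d = e := by
  apply PySem.Dict.ext
  rw [PySem.Dict.items_eq_map_keys d (by rw [hd]; exact hS) 0,
    PySem.Dict.items_eq_map_keys e (by rw [he]; exact hS) 0, hd, he]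
  exact List.map_congr_left (fun p hp => by rw [h p hp])

-- the scores tables of the two ports have the same items
theorem pv_scores_eq (students : List String) (R : PySem.Dict String (PySem.Dict String (PySem.Dict String Int)))
    (codes : List String) (hRnd : R.keys.Nodup)
    (hres : ∀ pr ∈ R.items, pr.2.keys.Nodup)
    (hmod : ∀ pr ∈ R.items, ∀ cm ∈ pr.2.items, cm.2.keys.Nodup)
    (hcodesnd : codes.Nodup)
    (hcodes_mem : ∀ pr ∈ R.items, ∀ cm ∈ pr.2.items, cm.1 ∈ codes)
    (s0 : PySem.Dict String (PySem.Dict String Int))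
    (hs0items : s0.items = codes.map (fun c =>
      (c, students.foldl (fun row pnr => row.insert pnr 0) PySem.Dict.empty))) :
    (codes.foldl (fun scores code =>
        students.foldl (fun scores pnr =>
          scores.insert code ((scores.getD code PySem.Dict.empty).insert pnr
            (if R.contains pnr && (R.getD pnr PySem.Dict.empty).contains code then
              ((R.getD pnr PySem.Dict.empty).getD code PySem.Dict.empty).keys.foldl
                (fun sc m => sc + ((R.getD pnr PySem.Dict.empty).getD code PySem.Dict.empty).getD m 0) 0
            else 0)))
          (scores.insert code PySem.Dict.empty))
        PySem.Dict.empty).items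
    = (R.items.foldl (fun scores pr =>
        if pr.1 ∈ PySem.Set.ofList students then
          pr.2.items.foldl (fun scores cm =>
            scores.modify cm.1 PySem.Dict.empty (fun row => row.modify pr.1 0 (· + cm.2.values.sum))) scores
        else scores) s0).items := by
  have hA : codes.foldl (fun scores code =>
        students.foldl (fun scores pnr =>
          scores.insert code ((scores.getD code PySem.Dict.empty).insert pnr
            (if R.contains pnr && (R.getD pnr PySem.Dict.empty).contains code then
              ((R.getD pnr PySem.Dict.empty).getD code PySem.Dict.empty).keys.foldl
                (fun sc m => sc + ((R.getD pnr PySem.Dict.empty).getD code PySem.Dict.empty).getD m 0) 0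
            else 0)))
          (scores.insert code PySem.Dict.empty))
        PySem.Dict.empty
      = codes.foldl (fun s code =>
          s.insert code (students.foldl (fun r pnr => r.insert pnr
            (if R.contains pnr && (R.getD pnr PySem.Dict.empty).contains code then
              ((R.getD pnr PySem.Dict.empty).getD code PySem.Dict.empty).keys.foldl
                (fun sc m => sc + ((R.getD pnr PySem.Dict.empty).getD code PySem.Dict.empty).getD m 0) 0
            else 0)) PySem.Dict.empty)) PySem.Dict.empty := by
    apply pv_foldl_congr_inv (fun _ => True) _ _ codes _ _ trivial
    intro a _ code _
    exact ⟨pv_A_inner_scores students _ code a PySem.Dict.empty, trivial⟩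
  rw [hA]
  rw [PySem.Dict.items_foldl_insert_fresh codes (fun c => c) _ PySem.Dict.empty
    (fun a _ => PySem.Dict.contains_empty a) (by simp only [List.map_id']; exact hcodesnd)]
  have hs0keys : s0.keys = codes := by
    simp only [PySem.Dict.keys, hs0items, List.map_map]
    simp [Function.comp_def]
  have hs0nd : s0.keys.Nodup := by rw [hs0keys]; exact hcodesnd
  have htouch : ∀ pr ∈ R.items, ∀ cm ∈ pr.2.items, cm.1 ∈ s0.keys := by
    intro pr hpr cm hcm
    rw [hs0keys]
    exact hcodes_mem pr hpr cm hcm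
  have hFkeys := pv_keys_scatter_outer R.items (PySem.Set.ofList students) s0 htouch
  rw [show (PySem.Dict.empty : PySem.Dict String (PySem.Dict String Int)).items = [] from rfl,
    List.nil_append]
  rw [PySem.Dict.items_eq_map_keys
    (R.items.foldl (fun scores pr =>
      if pr.1 ∈ PySem.Set.ofList students then
        pr.2.items.foldl (fun scores cm =>
          scores.modify cm.1 PySem.Dict.empty (fun row => row.modify pr.1 0 (· + cm.2.values.sum))) scores
      else scores) s0)
    (by rw [hFkeys, hs0keys]; exact hcodesnd) PySem.Dict.empty, hFkeys, hs0keys]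
  apply List.map_congr_left
  intro c hc
  suffices h : (students.foldl (fun r pnr => r.insert pnr
      (if R.contains pnr && (R.getD pnr PySem.Dict.empty).contains c then
        ((R.getD pnr PySem.Dict.empty).getD c PySem.Dict.empty).keys.foldl
          (fun sc m => sc + ((R.getD pnr PySem.Dict.empty).getD c PySem.Dict.empty).getD m 0) 0
      else 0)) PySem.Dict.empty)
      = (R.items.foldl (fun scores pr =>
          if pr.1 ∈ PySem.Set.ofList students then
            pr.2.items.foldl (fun scores cm =>
              scores.modify cm.1 PySem.Dict.empty (fun row => row.modify pr.1 0 (· + cm.2.values.sum))) scores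
          else scores) s0).getD c PySem.Dict.empty by
    rw [h]
  rw [pv_getD_scatter_outer]
  have hz : s0.getD c PySem.Dict.empty
      = students.foldl (fun row pnr => row.insert pnr 0) PySem.Dict.empty := by
    apply PySem.Dict.getD_of_mem_items _ _ hs0nd
    rw [hs0items]
    exact List.mem_map_of_mem (f := fun c => (c,
      students.foldl (fun (row : PySem.Dict String Int) pnr => row.insert pnr 0) PySem.Dict.empty)) hc
  rw [hz]
  have hzkeys : (students.foldl (fun (row : PySem.Dict String Int) pnr => row.insert pnr 0) PySem.Dict.empty).keys
      = PySem.Set.ofList students := by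
    rw [PySem.Dict.keys_foldl_insert students (fun _ _ => 0) PySem.Dict.empty, PySem.Dict.keys_empty]
    rfl
  have hkA : (students.foldl (fun r pnr => r.insert pnr
      (if R.contains pnr && (R.getD pnr PySem.Dict.empty).contains c then
        ((R.getD pnr PySem.Dict.empty).getD c PySem.Dict.empty).keys.foldl
          (fun sc m => sc + ((R.getD pnr PySem.Dict.empty).getD c PySem.Dict.empty).getD m 0) 0
      else 0)) PySem.Dict.empty).keys = PySem.Set.ofList students := by
    rw [PySem.Dict.keys_foldl_insert students _ PySem.Dict.empty, PySem.Dict.keys_empty]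
    rfl
  have hkF := pv_keys_rowscatter R.items (PySem.Set.ofList students) c
    (students.foldl (fun (row : PySem.Dict String Int) pnr => row.insert pnr 0) PySem.Dict.empty)
    (fun p hp => by rw [hzkeys]; exact hp)
  apply pv_dict_eq_of _ _ (PySem.Set.ofList students) hkA (hkF.trans hzkeys)
    (PySem.Set.nodup_ofList students)
  intro p hp
  have hps : p ∈ students := (PySem.Set.mem_ofList students p).mp hp
  rw [pv_getD_foldl_insert_fun students _ PySem.Dict.empty p 0, if_pos hps]
  rw [pv_getD_rowscatter R.items (PySem.Set.ofList students) c _ p,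
    pv_getD_foldl_insert_fun students (fun _ => 0) PySem.Dict.empty p 0, if_pos hps, if_pos hp,
    pv_cellsum R hRnd hres hmod p c, zero_add]

theorem pv_ports_eq (students : List String) (results : List (String × List (String × List (String × Int)))) :
    compute_student_scores_per_course students results = compute_student_scores_per_course_alt students results := by
  simp only [compute_student_scores_per_course, compute_student_scores_per_course_alt,
    get_course_codes]
  have hRnd : (pvToDicts results).keys.Nodup := PySem.Dict.nodup_keys_ofList _
  have hres : ∀ pr ∈ (pvToDicts results).items, pr.2.keys.Nodup := by
    intro pr hpr
    obtain ⟨a, _, hEq⟩ := List.mem_map.mp (pv_mem_items_ofList _ _ hpr)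
    rw [← hEq]
    exact PySem.Dict.nodup_keys_ofList _
  have hmod : ∀ pr ∈ (pvToDicts results).items, ∀ cm ∈ pr.2.items, cm.2.keys.Nodup := by
    intro pr hpr cm hcm
    obtain ⟨a, _, hEq⟩ := List.mem_map.mp (pv_mem_items_ofList _ _ hpr)
    rw [← hEq] at hcm
    obtain ⟨b, _, hEq2⟩ := List.mem_map.mp (pv_mem_items_ofList _ _ hcm)
    rw [← hEq2]
    exact PySem.Dict.nodup_keys_ofList _
  rw [pv_totals_eq students (pvToDicts results).items hres PySem.Dict.empty
    (by rw [PySem.Dict.keys_empty]; exact List.nodup_nil)]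
  have htotnd := pv_nodup_keys_totals students (pvToDicts results).items PySem.Dict.empty
    (by rw [PySem.Dict.keys_empty]; exact List.nodup_nil)
  have hcodesnd : (PySem.List.sorted (List.foldl (fun totals pr =>
      pr.2.items.foldl (fun totals cm =>
        totals.insert cm.1 (totals.getD cm.1 0 + (if pr.1 ∈ PySem.Set.ofList students then cm.2.values.sum else 0)))
        totals) PySem.Dict.empty (pvToDicts results).items).keys
      (fun code => (List.foldl (fun totals pr =>
      pr.2.items.foldl (fun totals cm =>
        totals.insert cm.1 (totals.getD cm.1 0 + (if pr.1 ∈ PySem.Set.ofList students then cm.2.values.sum else 0)))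
        totals) PySem.Dict.empty (pvToDicts results).items).getD code 0) true).Nodup :=
    (PySem.List.sorted_perm _ _ _).nodup_iff.mpr htotnd
  have hcodes_mem : ∀ pr ∈ (pvToDicts results).items, ∀ cm ∈ pr.2.items,
      cm.1 ∈ PySem.List.sorted (List.foldl (fun totals pr =>
      pr.2.items.foldl (fun totals cm =>
        totals.insert cm.1 (totals.getD cm.1 0 + (if pr.1 ∈ PySem.Set.ofList students then cm.2.values.sum else 0)))
        totals) PySem.Dict.empty (pvToDicts results).items).keys
      (fun code => (List.foldl (fun totals pr =>
      pr.2.items.foldl (fun totals cm =>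
        totals.insert cm.1 (totals.getD cm.1 0 + (if pr.1 ∈ PySem.Set.ofList students then cm.2.values.sum else 0)))
        totals) PySem.Dict.empty (pvToDicts results).items).getD code 0) true := by
    intro pr hpr cm hcm
    rw [(PySem.List.sorted_perm _ _ _).mem_iff]
    exact pv_mem_keys_totals students (pvToDicts results).items PySem.Dict.empty cm.1
      (Or.inr ⟨pr, hpr, List.mem_map_of_mem (f := Prod.fst) hcm⟩)
  rw [pv_scores_eq students (pvToDicts results) _ hRnd hres hmod hcodesnd hcodes_mem _
    (by rw [PySem.Dict.items_foldl_insert_fresh _ (fun c => c) _ PySem.Dict.empty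
          (fun a _ => PySem.Dict.contains_empty a) (by simp only [List.map_id']; exact hcodesnd)]
        rfl)]

-- ===== VERDICT (by name: the statement is the Claim_ definition above) =====
theorem compute_student_scores_per_course_spec : Claim_equal_compute_student_scores_per_course := by
  intro students results _
  exact pv_ports_eq students results
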